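-- pv_equiv track=rewrite | github.com/loiluu/smc | rawutils.py | get_all_case_strings
-- ===== SOURCE A (Python) =====
-- def get_all_case_strings(t):
--     result = [[], []]
--     index = 0
--     for i in t:
--         if len(result[index]):
--             for item in result[index]:
--                 if i.lower() == i.upper():
--                     result[1-index].append(item + i)
--                 else:
--                     result[1-index].append(item + i.lower())
--                     result[1-index].append(item + i.upper())
--         else:
--             if i.lower() == i.upper():
--                 result[1-index].append(i.lower())
--             else:
--                 result[1-index].append(i.lower())
--                 result[1-index].append(i.upper())
--         result[index][:] = []
--         index = 1 - index
--     return result[index]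
-- ===== SOURCE B (Python) =====
-- def get_all_case_strings(t):
--     # Recursive suffix decomposition instead of A's iterative two-buffer doubling.
--     if not t:
--         return []
--
--     def combos(s):
--         if not s:
--             return ['']
--         c = s[0]
--         rest = combos(s[1:])
--         if c.lower() == c.upper():
--             return [c.lower() + r for r in rest]
--         return [c.lower() + r for r in rest] + [c.upper() + r for r in rest]
--
--     return combos(t)
-- ===== Notes on version B (the rewrite author's own statement) =====
-- stated objective: simpler
-- what changed: Replaced A's iterative two-buffer ping-pong accumulator (building prefixes left-to-right and doubling in place) with a direct structural recursion on the string that builds suffix combinations back-to-front and prepends each case of the first character.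
import Mathlib
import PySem

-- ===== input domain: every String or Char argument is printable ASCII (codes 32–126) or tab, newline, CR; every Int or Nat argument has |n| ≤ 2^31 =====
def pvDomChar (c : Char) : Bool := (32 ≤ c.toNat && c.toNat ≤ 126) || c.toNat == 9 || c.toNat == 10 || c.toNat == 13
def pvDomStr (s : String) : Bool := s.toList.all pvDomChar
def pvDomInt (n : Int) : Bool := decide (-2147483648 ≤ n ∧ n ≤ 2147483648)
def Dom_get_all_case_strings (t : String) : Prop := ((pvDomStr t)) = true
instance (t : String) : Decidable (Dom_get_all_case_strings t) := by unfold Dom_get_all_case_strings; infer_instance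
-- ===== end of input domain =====

-- B replaces A's iterative two-buffer doubling accumulator by a structural recursion on the
-- string (suffix combinations, each case of the head prepended): simpler, same output and order.

-- ===== PORT A =====
-- One loop step of A. Python ping-pongs between result[0] and result[1], clearing the buffer
-- just read (result[index][:] = []) and flipping index, so the live state after each iteration
-- is exactly the buffer just filled: `cur` below is result[index] at the top of the loop body.
def pvStepA (cur : List String) (i : Char) : List String :=
  let lo := PySem.Str.lower (String.singleton i)
  let up := PySem.Str.upper (String.singleton i)
  if cur.length ≠ 0 then
    cur.foldl (fun nxt item =>
      if lo == up then nxt ++ [item ++ String.singleton i]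
      else nxt ++ [item ++ lo, item ++ up]) []
  else
    if lo == up then [lo] else [lo, up]

def get_all_case_strings (t : String) : List String :=
  t.toList.foldl pvStepA []

-- ===== PORT B =====
-- combos(s) of Source B: structural recursion on the character list
def pvCombos : List Char → List String
  | [] => [""]
  | c :: rest =>
    let r := pvCombos rest
    let lo := PySem.Str.lower (String.singleton c)
    let up := PySem.Str.upper (String.singleton c)
    if lo == up then r.map (fun s => lo ++ s)
    else r.map (fun s => lo ++ s) ++ r.map (fun s => up ++ s)

def get_all_case_strings_alt (t : String) : List String :=
  if t == "" then [] else pvCombos t.toList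

-- ===== PRECONDITION & SPEC =====
def Spec_get_all_case_strings (t : String) (out : List String) : Prop := out = get_all_case_strings_alt t
instance (t : String) (out : List String) : Decidable (Spec_get_all_case_strings t out) := by unfold Spec_get_all_case_strings; infer_instance

-- ===== CLAIM (what is proved, stated in full; the proofs are below) =====
def Claim_equal_get_all_case_strings : Prop := ∀ (t : String), Dom_get_all_case_strings t → Spec_get_all_case_strings t (get_all_case_strings t)

-- ===== LEMMAS AND PROOFS =====

-- a character whose lowercase equals its uppercase is unchanged by lowercasing
lemma pv_char_fix (c : Char)
    (h : PySem.Chars.lowerChar c = PySem.Chars.upperChar c) :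
    PySem.Chars.lowerChar c = c := by
  unfold PySem.Chars.lowerChar PySem.Chars.upperChar PySem.Chars.isupper PySem.Chars.islower at *
  by_cases hu : 'A' ≤ c ∧ c ≤ 'Z'
  · exfalso
    have hub : c.toNat ≤ 90 := hu.2
    have hlb : 65 ≤ c.toNat := hu.1
    have hnl : ¬ ('a' ≤ c ∧ c ≤ 'z') := by
      intro hc
      have : 97 ≤ c.toNat := hc.1
      omega
    simp only [decide_eq_true_eq, Bool.and_eq_true, hu, hnl, if_false] at h
    rw [if_pos (⟨trivial, trivial⟩ : True ∧ True)] at h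
    have := congrArg Char.toNat h
    rw [Char.toNat_ofNat] at this
    have hv : (c.toNat + 32).isValidChar := by
      unfold Nat.isValidChar
      omega
    rw [if_pos hv] at this
    omega
  · simp only [decide_eq_true_eq, Bool.and_eq_true] at *
    rw [if_neg hu]

-- the same fact lifted to the one-character strings the ports compare
lemma pv_caseless_fix (c : Char)
    (h : PySem.Str.lower (String.singleton c) = PySem.Str.upper (String.singleton c)) :
    PySem.Str.lower (String.singleton c) = String.singleton c := by
  have h' : PySem.Chars.lowerChar c = PySem.Chars.upperChar c := by
    have := congrArg String.toList h
    simpa [PySem.Chars.lower, PySem.Chars.upper] using this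
  have h2 := pv_char_fix c h'
  have : (PySem.Str.lower (String.singleton c)).toList = (String.singleton c).toList := by
    simp [PySem.Chars.lower, h2]
  exact String.toList_inj.mp this

-- A's inner loop over a nonempty buffer is a flatMap of the per-prefix options
lemma pv_stepA_nonempty (acc : List String) (i : Char) (h : acc ≠ []) :
    pvStepA acc i = acc.flatMap (fun item =>
      if PySem.Str.lower (String.singleton i) == PySem.Str.upper (String.singleton i)
      then [item ++ String.singleton i]
      else [item ++ PySem.Str.lower (String.singleton i), item ++ PySem.Str.upper (String.singleton i)]) := by
  unfold pvStepA
  rw [if_pos (by simpa using h)]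
  by_cases hc : (PySem.Str.lower (String.singleton i) == PySem.Str.upper (String.singleton i)) = true
  · simp only [hc, if_true]
    simpa using PySem.List.foldl_append_eq_flatMap (fun item => [item ++ String.singleton i]) acc []
  · simp only [hc, if_false, Bool.false_eq_true]
    simpa using PySem.List.foldl_append_eq_flatMap
      (fun item => [item ++ PySem.Str.lower (String.singleton i), item ++ PySem.Str.upper (String.singleton i)]) acc []

lemma pv_stepA_ne_nil (cur : List String) (i : Char) (h : cur ≠ []) :
    pvStepA cur i ≠ [] := by
  rw [pv_stepA_nonempty cur i h]
  obtain ⟨a, as, rfl⟩ := List.exists_cons_of_ne_nil h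
  simp only [List.flatMap_cons, ne_eq, List.append_eq_nil_iff, not_and]
  intro hf
  split_ifs at hf

-- loop invariant: A's fold from a nonempty buffer appends every case combination
-- of the remaining characters (in B's recursive order) to every buffered prefix
lemma pv_fold_eq (l : List Char) : ∀ (acc : List String), acc ≠ [] →
    l.foldl pvStepA acc = acc.flatMap (fun item => (pvCombos l).map (fun s => item ++ s)) := by
  induction l with
  | nil =>
    intro acc h
    simp [pvCombos]
  | cons c l ih =>
    intro acc h
    rw [List.foldl_cons, ih _ (pv_stepA_ne_nil _ _ h), pv_stepA_nonempty _ _ h,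
      List.flatMap_assoc]
    have hfun : ∀ item : String,
        ((if PySem.Str.lower (String.singleton c) == PySem.Str.upper (String.singleton c)
          then [item ++ String.singleton c]
          else [item ++ PySem.Str.lower (String.singleton c),
                item ++ PySem.Str.upper (String.singleton c)]).flatMap
            (fun j => (pvCombos l).map (fun s => j ++ s)))
        = (pvCombos (c :: l)).map (fun s => item ++ s) := by
      intro item
      by_cases hc : (PySem.Str.lower (String.singleton c) == PySem.Str.upper (String.singleton c)) = true
      · have hfix := pv_caseless_fix c (by simpa using hc)
        simp only [pvCombos, hc, if_true, List.flatMap_cons, List.flatMap_nil, List.append_nil,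
          List.map_map]
        rw [hfix]
        simp only [Function.comp_def]
        refine List.map_congr_left fun a _ => ?_
        rw [← String.append_assoc]
      · simp only [pvCombos, hc, Bool.false_eq_true, if_false, List.flatMap_cons, List.flatMap_nil,
          List.append_nil, List.map_append, List.map_map]
        simp [Function.comp_def, String.append_assoc]
    exact List.flatMap_congr (fun item _ => hfun item)

-- ===== VERDICT (by name: the statement is the Claim_ definition above) =====
theorem get_all_case_strings_spec : Claim_equal_get_all_case_strings := by
  intro t _
  show get_all_case_strings t = get_all_case_strings_alt t
  unfold get_all_case_strings get_all_case_strings_alt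
  cases ht : t.toList with
  | nil =>
    have ht0 : t = "" := by
      rw [← String.toList_inj, ht]
      rfl
    simp [ht0]
  | cons c l =>
    have hne : (t == "") ≠ true := by
      intro hb
      rw [beq_iff_eq] at hb
      rw [hb] at ht
      simp at ht
    rw [if_neg (by simpa using hne), List.foldl_cons]
    have hinit : pvStepA [] c =
        (if PySem.Str.lower (String.singleton c) == PySem.Str.upper (String.singleton c)
         then [PySem.Str.lower (String.singleton c)]
         else [PySem.Str.lower (String.singleton c), PySem.Str.upper (String.singleton c)]) := by
      simp [pvStepA]
    have hinit_ne : pvStepA [] c ≠ [] := by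
      rw [hinit]; split_ifs <;> simp
    rw [pv_fold_eq l _ hinit_ne, hinit]
    by_cases hc : (PySem.Str.lower (String.singleton c) == PySem.Str.upper (String.singleton c)) = true
    · simp [pvCombos, hc]
    · simp [pvCombos, hc]
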